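-- pv_equiv track=rewrite | github.com/adriano-b-volpato/mooc-programming-23 | part04-38_grade_statistics/src/grade_statistics.py | grading
-- ===== SOURCE A (Python) =====
-- def grading(points, exam_pts):
--     fail = 0
--     grade1 = 0
--     grade2 = 0
--     grade3 = 0
--     grade4 = 0
--     grade5 = 0
--     for i in range(len(points)):
--         if exam_pts[i] < 10:
--             fail += 1
--             continue
--         if points[i] <=14:
--             fail += 1
--         if 14 < points[i] <= 17:
--             grade1 += 1
--         if 17 < points[i] <= 20:
--             grade2 += 1
--         if 20 < points[i] <= 23:
--             grade3 += 1
--         if 23 < points[i] <= 27: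
--             grade4 += 1
--         if 27 < points[i] <= 30:
--             grade5 += 1
--
--
--
--     return fail, grade1, grade2, grade3, grade4, grade5
-- ===== SOURCE B (Python) =====
-- def grading(points, exam_pts):
--     pairs = list(zip(points, exam_pts))
--     fail = sum(1 for p, e in pairs if e < 10 or p <= 14)
--
--     def bucket(lo, hi):
--         return sum(1 for p, e in pairs if e >= 10 and lo < p <= hi)
--
--     return (fail, bucket(14, 17), bucket(17, 20), bucket(20, 23),
--             bucket(23, 27), bucket(27, 30))
-- ===== Notes on version B (the rewrite author's own statement) =====
-- stated objective: idiomatic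
-- what changed: Replaces A's single index loop that dispatches each student into one of six mutually updated counters with six independent per-bucket counts (sum over a zipped pair list with a closed predicate per bucket), removing all indexing and mutable state.
import Mathlib
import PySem

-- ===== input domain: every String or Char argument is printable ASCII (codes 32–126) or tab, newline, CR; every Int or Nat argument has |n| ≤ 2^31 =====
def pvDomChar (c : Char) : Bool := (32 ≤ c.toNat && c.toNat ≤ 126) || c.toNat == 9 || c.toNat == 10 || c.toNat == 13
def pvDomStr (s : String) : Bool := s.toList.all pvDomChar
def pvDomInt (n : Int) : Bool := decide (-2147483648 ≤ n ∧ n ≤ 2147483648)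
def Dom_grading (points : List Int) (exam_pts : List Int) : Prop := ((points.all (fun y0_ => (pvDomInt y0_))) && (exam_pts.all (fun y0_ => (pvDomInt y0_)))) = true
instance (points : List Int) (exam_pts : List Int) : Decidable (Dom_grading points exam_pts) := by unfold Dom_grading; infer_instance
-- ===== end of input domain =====

-- B replaces A's single dispatching index loop by six independent per-bucket counts over the zipped lists (idiomatic; same cost).

-- ===== PORT A =====
-- literal transliteration of A: fold over range(len(points)) carrying the six counters
def grading (points : List Int) (exam_pts : List Int) : Int × Int × Int × Int × Int × Int :=
  (PySem.List.pyRange 0 (points.length : Int) 1).foldl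
    (fun acc i =>
      let (fail, grade1, grade2, grade3, grade4, grade5) := acc
      if PySem.List.pyGetD exam_pts i 0 < 10 then
        (fail + 1, grade1, grade2, grade3, grade4, grade5)
      else
        let p := PySem.List.pyGetD points i 0
        let fail := if p ≤ 14 then fail + 1 else fail
        let grade1 := if 14 < p ∧ p ≤ 17 then grade1 + 1 else grade1
        let grade2 := if 17 < p ∧ p ≤ 20 then grade2 + 1 else grade2
        let grade3 := if 20 < p ∧ p ≤ 23 then grade3 + 1 else grade3
        let grade4 := if 23 < p ∧ p ≤ 27 then grade4 + 1 else grade4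
        let grade5 := if 27 < p ∧ p ≤ 30 then grade5 + 1 else grade5
        (fail, grade1, grade2, grade3, grade4, grade5))
    (0, 0, 0, 0, 0, 0)

-- ===== PORT B =====
-- literal transliteration of Source B: zip the lists once, then count each bucket independently
def grading_alt (points : List Int) (exam_pts : List Int) : Int × Int × Int × Int × Int × Int :=
  let pairs := points.zip exam_pts
  let fail : Int := pairs.countP (fun pe => decide (pe.2 < 10 ∨ pe.1 ≤ 14))
  let bucket : Int → Int → Int := fun lo hi =>
    (pairs.countP (fun pe => decide (10 ≤ pe.2 ∧ lo < pe.1 ∧ pe.1 ≤ hi)) : Int)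
  (fail, bucket 14 17, bucket 17 20, bucket 20 23, bucket 23 27, bucket 27 30)

-- ===== PRECONDITION & SPEC =====
-- A indexes exam_pts at every i < len(points); it raises IndexError iff exam_pts is shorter than points.
def Pre_grading (points : List Int) (exam_pts : List Int) : Prop :=
  points.length ≤ exam_pts.length
instance (points : List Int) (exam_pts : List Int) : Decidable (Pre_grading points exam_pts) := by unfold Pre_grading; infer_instance

def pvWitness_grading : List Int × List Int := ([12, 16, 31], [10, 10, 10])

def Spec_grading (points : List Int) (exam_pts : List Int) (out : Int × Int × Int × Int × Int × Int) : Prop := out = grading_alt points exam_pts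
instance (points : List Int) (exam_pts : List Int) (out : Int × Int × Int × Int × Int × Int) : Decidable (Spec_grading points exam_pts out) := by unfold Spec_grading; infer_instance

-- ===== CLAIM (what is proved, stated in full; the proofs are below) =====
def Claim_equal_grading : Prop := ∀ (points : List Int) (exam_pts : List Int), Dom_grading points exam_pts → Pre_grading points exam_pts → Spec_grading points exam_pts (grading points exam_pts)

-- ===== LEMMAS AND PROOFS =====

-- A's loop body, expressed on a (point, exam) pair
def stepA (acc : Int × Int × Int × Int × Int × Int) (pe : Int × Int) : Int × Int × Int × Int × Int × Int :=
  let (fail, grade1, grade2, grade3, grade4, grade5) := acc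
  if pe.2 < 10 then
    (fail + 1, grade1, grade2, grade3, grade4, grade5)
  else
    let p := pe.1
    let fail := if p ≤ 14 then fail + 1 else fail
    let grade1 := if 14 < p ∧ p ≤ 17 then grade1 + 1 else grade1
    let grade2 := if 17 < p ∧ p ≤ 20 then grade2 + 1 else grade2
    let grade3 := if 20 < p ∧ p ≤ 23 then grade3 + 1 else grade3
    let grade4 := if 23 < p ∧ p ≤ 27 then grade4 + 1 else grade4
    let grade5 := if 27 < p ∧ p ≤ 30 then grade5 + 1 else grade5
    (fail, grade1, grade2, grade3, grade4, grade5)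

lemma ite_add_one {c : Prop} [Decidable c] (x : Int) :
    (if c then x + 1 else x) = x + (if c then 1 else 0) := by
  split_ifs <;> omega

lemma stepA_eq (acc : Int × Int × Int × Int × Int × Int) (pe : Int × Int) :
    stepA acc pe =
      (acc.1 + (if pe.2 < 10 ∨ pe.1 ≤ 14 then 1 else 0),
       acc.2.1 + (if 10 ≤ pe.2 ∧ 14 < pe.1 ∧ pe.1 ≤ 17 then 1 else 0),
       acc.2.2.1 + (if 10 ≤ pe.2 ∧ 17 < pe.1 ∧ pe.1 ≤ 20 then 1 else 0),
       acc.2.2.2.1 + (if 10 ≤ pe.2 ∧ 20 < pe.1 ∧ pe.1 ≤ 23 then 1 else 0),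
       acc.2.2.2.2.1 + (if 10 ≤ pe.2 ∧ 23 < pe.1 ∧ pe.1 ≤ 27 then 1 else 0),
       acc.2.2.2.2.2 + (if 10 ≤ pe.2 ∧ 27 < pe.1 ∧ pe.1 ≤ 30 then 1 else 0)) := by
  obtain ⟨f, g1, g2, g3, g4, g5⟩ := acc
  by_cases h : pe.2 < 10
  · have hten : ¬ (10 : Int) ≤ pe.2 := by omega
    simp only [stepA, if_pos h, if_pos (Or.inl h), hten, false_and, if_false]
    simp
  · have hten : (10 : Int) ≤ pe.2 := by omega
    simp only [stepA, if_neg h, or_iff_right h, and_iff_right hten, ite_add_one]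

lemma foldl_stepA_counts (l : List (Int × Int)) :
    ∀ acc : Int × Int × Int × Int × Int × Int,
    l.foldl stepA acc =
      (acc.1 + l.countP (fun pe => decide (pe.2 < 10 ∨ pe.1 ≤ 14)),
       acc.2.1 + l.countP (fun pe => decide (10 ≤ pe.2 ∧ 14 < pe.1 ∧ pe.1 ≤ 17)),
       acc.2.2.1 + l.countP (fun pe => decide (10 ≤ pe.2 ∧ 17 < pe.1 ∧ pe.1 ≤ 20)),
       acc.2.2.2.1 + l.countP (fun pe => decide (10 ≤ pe.2 ∧ 20 < pe.1 ∧ pe.1 ≤ 23)),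
       acc.2.2.2.2.1 + l.countP (fun pe => decide (10 ≤ pe.2 ∧ 23 < pe.1 ∧ pe.1 ≤ 27)),
       acc.2.2.2.2.2 + l.countP (fun pe => decide (10 ≤ pe.2 ∧ 27 < pe.1 ∧ pe.1 ≤ 30))) := by
  induction l with
  | nil => intro acc; simp
  | cons x xs ih =>
    intro acc
    rw [List.foldl_cons, stepA_eq, ih]
    simp only [List.countP_cons, decide_eq_true_eq, Prod.mk.injEq]
    push_cast
    split_ifs <;> omega

-- A's index-based fold equals the fold of stepA over the zipped lists
lemma grading_eq_fold_zip (points exam_pts : List Int) (h : Pre_grading points exam_pts) :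
    grading points exam_pts = (points.zip exam_pts).foldl stepA (0, 0, 0, 0, 0, 0) := by
  unfold grading
  have hp : points.length ≤ exam_pts.length := h
  have hz : (points.zip exam_pts).length = points.length := by
    simp [List.length_zip]; omega
  rw [PySem.List.foldl_congr_mem _ _
        (fun acc i => stepA acc (PySem.List.pyGetD (points.zip exam_pts) i ((0:Int), (0:Int)))) _ ?_]
  · rw [show ((points.length : Int)) = ((points.zip exam_pts).length : Int) by exact_mod_cast hz.symm]
    exact PySem.List.foldl_pyRange_zero_pyGetD' _ _ _ _
  · intro acc i hi
    rw [PySem.List.mem_pyRange_one] at hi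
    have h0 : 0 ≤ i := hi.1
    have h1 : i < ((points.zip exam_pts).length : Int) := by omega
    have h2 : i < ((points.length : Int)) := hi.2
    have h3 : i < ((exam_pts.length : Int)) := by omega
    simp only [stepA]
    rw [PySem.List.pyGetD_eq_getElem (points.zip exam_pts) _ h0 h1,
        PySem.List.pyGetD_eq_getElem points _ h0 h2,
        PySem.List.pyGetD_eq_getElem exam_pts _ h0 h3]
    simp [List.getElem_zip]

-- ===== VERDICT (by name: the statement is the Claim_ definition above) =====
theorem grading_spec : Claim_equal_grading := by
  intro points exam_pts _ hpre
  show grading points exam_pts = grading_alt points exam_pts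
  rw [grading_eq_fold_zip points exam_pts hpre, foldl_stepA_counts]
  simp [grading_alt]
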